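-- pv_equiv track=rewrite | github.com/oks-citadel/UGC-Content-Creation-SaaS-Platform | ai/customer-agent/src/agents/sales_agent.py | _score_timeline
-- ===== SOURCE A (Python) =====
-- from typing import Dict, List, Any, Optional
--
-- def _score_timeline(timeline: Optional[str]) -> int:
--     if not timeline:
--         return 25
--     timeline_lower = timeline.lower()
--     if any(x in timeline_lower for x in ["immediately", "asap", "this week", "urgent"]):
--         return 100
--     elif any(x in timeline_lower for x in ["this month", "30 days", "soon"]):
--         return 75
--     elif any(x in timeline_lower for x in ["quarter", "3 months", "q1", "q2", "q3", "q4"]):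
--         return 50
--     return 25
-- ===== SOURCE B (Python) =====
-- from typing import Dict, List, Any, Optional
--
-- _KEYWORD_SCORES = [
--     ("immediately", 100), ("asap", 100), ("this week", 100), ("urgent", 100),
--     ("this month", 75), ("30 days", 75), ("soon", 75),
--     ("quarter", 50), ("3 months", 50), ("q1", 50), ("q2", 50), ("q3", 50), ("q4", 50),
-- ]
--
-- def _score_timeline(timeline: Optional[str]) -> int:
--     if not timeline:
--         return 25
--     timeline_lower = timeline.lower()
--     return max((score for kw, score in _KEYWORD_SCORES if kw in timeline_lower), default=25)
-- ===== Notes on version B (the rewrite author's own statement) =====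
-- stated objective: alternative
-- what changed: Replaces the ordered if/elif cascade of any(...) group checks with a single flat keyword-to-score table scanned once, taking the maximum score over all matching keywords (default 25); equivalent because the cascade checks groups in decreasing score order.
import Mathlib
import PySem

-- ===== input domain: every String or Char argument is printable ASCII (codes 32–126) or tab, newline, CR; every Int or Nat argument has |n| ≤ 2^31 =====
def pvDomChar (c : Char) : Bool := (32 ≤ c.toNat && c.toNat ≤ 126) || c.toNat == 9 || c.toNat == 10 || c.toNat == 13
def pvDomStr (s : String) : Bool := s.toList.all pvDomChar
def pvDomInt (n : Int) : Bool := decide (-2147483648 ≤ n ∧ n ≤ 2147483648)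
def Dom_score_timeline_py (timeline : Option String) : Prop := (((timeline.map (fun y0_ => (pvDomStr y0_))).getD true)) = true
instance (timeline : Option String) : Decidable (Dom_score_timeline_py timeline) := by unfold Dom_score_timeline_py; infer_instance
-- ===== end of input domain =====

-- B replaces A's ordered if/elif group cascade with a flat keyword->score table and a max over all matches (alternative decomposition, same cost).


-- ===== PORT A =====
def score_timeline_py (timeline : Option String) : Int :=
  match timeline with
  | none => 25
  | some t =>
    if t = "" then 25
    else
      let timeline_lower := PySem.Str.lower t
      if ["immediately", "asap", "this week", "urgent"].any (fun x => PySem.Str.isIn x timeline_lower) then 100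
      else if ["this month", "30 days", "soon"].any (fun x => PySem.Str.isIn x timeline_lower) then 75
      else if ["quarter", "3 months", "q1", "q2", "q3", "q4"].any (fun x => PySem.Str.isIn x timeline_lower) then 50
      else 25

-- ===== PORT B =====
-- flat keyword-to-score table (B's _KEYWORD_SCORES)
def kwScores : List (String × Int) :=
  [("immediately", 100), ("asap", 100), ("this week", 100), ("urgent", 100),
   ("this month", 75), ("30 days", 75), ("soon", 75),
   ("quarter", 50), ("3 months", 50), ("q1", 50), ("q2", 50), ("q3", 50), ("q4", 50)]

def score_timeline_py_alt (timeline : Option String) : Int :=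
  match timeline with
  | none => 25
  | some t =>
    if t = "" then 25
    else
      let timeline_lower := PySem.Str.lower t
      ((kwScores.filter (fun p => PySem.Str.isIn p.1 timeline_lower)).map Prod.snd).foldl max 25

-- ===== PRECONDITION & SPEC =====
def Spec_score_timeline_py (timeline : Option String) (out : Int) : Prop := out = score_timeline_py_alt timeline
instance (timeline : Option String) (out : Int) : Decidable (Spec_score_timeline_py timeline out) := by unfold Spec_score_timeline_py; infer_instance

-- ===== CLAIM (what is proved, stated in full; the proofs are below) =====
def Claim_equal_score_timeline_py : Prop := ∀ (timeline : Option String), Dom_score_timeline_py timeline → Spec_score_timeline_py timeline (score_timeline_py timeline)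

-- ===== LEMMAS AND PROOFS =====

-- max-fold over the snd's of a filtered list whose snd's are all v
theorem pv_foldl_max_filter_const (c : String × Int → Bool) (v : Int) :
    ∀ (l : List (String × Int)) (a : Int), (∀ p ∈ l, p.2 = v) →
      ((l.filter c).map Prod.snd).foldl max a = if l.any c then max a v else a := by
  intro l
  induction l with
  | nil => intro a _; simp
  | cons p l ih =>
    intro a h
    have hp : p.2 = v := h p (List.mem_cons_self)
    have hl : ∀ q ∈ l, q.2 = v := fun q hq => h q (List.mem_cons_of_mem _ hq)
    by_cases hc : c p = true
    · simp [hc, List.any_cons, hp, ih (max a v) hl]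
    · rw [Bool.not_eq_true] at hc
      have ha : (p :: l).any c = l.any c := by simp [List.any_cons, hc]
      have hf : (p :: l).filter c = l.filter c := by simp [hc]
      rw [hf, ha, ih a hl]

-- ===== VERDICT (by name: the statement is the Claim_ definition above) =====
theorem score_timeline_py_spec : Claim_equal_score_timeline_py := by
  intro timeline _
  unfold Spec_score_timeline_py score_timeline_py score_timeline_py_alt
  cases timeline with
  | none => rfl
  | some t =>
    by_cases ht : t = ""
    · simp [ht]
    · have e : kwScores =
        ([("immediately", (100:Int)), ("asap", 100), ("this week", 100), ("urgent", 100)] ++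
         ([("this month", (75:Int)), ("30 days", 75), ("soon", 75)] ++
          [("quarter", (50:Int)), ("3 months", 50), ("q1", 50), ("q2", 50), ("q3", 50), ("q4", 50)])) := rfl
      simp only [ht, if_false, e, List.filter_append, List.map_append, List.foldl_append]
      rw [pv_foldl_max_filter_const _ 50 _ _ (by decide),
          pv_foldl_max_filter_const _ 75 _ _ (by decide),
          pv_foldl_max_filter_const _ 100 _ _ (by decide)]
      simp only [List.any_cons, List.any_nil, Bool.or_false]
      generalize (PySem.Str.isIn "immediately" (PySem.Str.lower t) ||
        (PySem.Str.isIn "asap" (PySem.Str.lower t) ||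
         (PySem.Str.isIn "this week" (PySem.Str.lower t) ||
          PySem.Str.isIn "urgent" (PySem.Str.lower t)))) = a1
      generalize (PySem.Str.isIn "this month" (PySem.Str.lower t) ||
        (PySem.Str.isIn "30 days" (PySem.Str.lower t) ||
         PySem.Str.isIn "soon" (PySem.Str.lower t))) = a2
      generalize (PySem.Str.isIn "quarter" (PySem.Str.lower t) ||
        (PySem.Str.isIn "3 months" (PySem.Str.lower t) ||
         (PySem.Str.isIn "q1" (PySem.Str.lower t) ||
          (PySem.Str.isIn "q2" (PySem.Str.lower t) ||
           (PySem.Str.isIn "q3" (PySem.Str.lower t) ||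
            PySem.Str.isIn "q4" (PySem.Str.lower t)))))) = a3
      revert a1 a2 a3
      decide
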